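-- pv_equiv track=rewrite | github.com/karim-farhang/ICPC-Problem-Solveing | NEW_GRAPH/making_wired_connections.py | make_con
-- ===== SOURCE A (Python) =====
-- def DFS(adj, node, visited):
--     if visited[node]:
--         return
--     visited[node] = True
--     if node in adj:
--         for x in adj[node]:
--             if not visited[x]:
--                 DFS(adj, x, visited)
--
-- def make_con(node, G_adj, edge):
--     visited = [False] * node
--     adj = {}
--     edges = 0
--     for i in range(edge):
--         if G_adj[i][0] in adj:
--             adj[G_adj[i][0]].append(G_adj[i][1])
--         else:
--             adj[G_adj[i][0]] = []
--         if G_adj[i][1] in adj: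
--             adj[G_adj[i][1]].append(G_adj[i][0])
--         else:
--             adj[G_adj[i][1]] = []
--         edges += 1
--     components = 0
--     for i in range(node):
--         if not visited[i]:
--             components += 1
--             DFS(adj, i, visited)
--     if edges < node - 1:
--         return -1
--     redundant = edges - ((node - 1) - (components - 1))
--     if redundant >= (components - 1):
--         return components - 1
--     return -1
-- ===== SOURCE B (Python) =====
-- def make_con(node, G_adj, edge):
--     visited = [False] * node
--     adj = {}
--     edges = 0
--     for i in range(edge):
--         a = G_adj[i][0]
--         b = G_adj[i][1]
--         if a in adj:
--             adj[a].append(b)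
--         else:
--             adj[a] = []
--         if b in adj:
--             adj[b].append(a)
--         else:
--             adj[b] = []
--         edges += 1
--     components = 0
--     for i in range(node):
--         if not visited[i]:
--             components += 1
--             queue = [i]
--             head = 0
--             while head < len(queue):
--                 u = queue[head]
--                 head += 1
--                 if visited[u]:
--                     continue
--                 visited[u] = True
--                 queue.extend(adj.get(u, []))
--     if edges < node - 1:
--         return -1
--     redundant = edges - ((node - 1) - (components - 1))
--     if redundant >= (components - 1):
--         return components - 1
--     return -1
-- ===== Notes on version B (the rewrite author's own statement) =====
-- stated objective: alternative
-- what changed: A's recursive DFS helper is replaced by an iterative traversal: each unvisited start node is explored with an explicit growing worklist (queue with a moving read pointer) instead of recursion, while the buggy first-sighting adjacency build, the edge counter and the redundancy formula are kept verbatim.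
-- outside the precondition, e.g. on make_con(5, [[0, 3], [0, 4], [-4, 0], [-4, -2], [4, 1]], 5): A returns 2, B returns 1
import Mathlib
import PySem

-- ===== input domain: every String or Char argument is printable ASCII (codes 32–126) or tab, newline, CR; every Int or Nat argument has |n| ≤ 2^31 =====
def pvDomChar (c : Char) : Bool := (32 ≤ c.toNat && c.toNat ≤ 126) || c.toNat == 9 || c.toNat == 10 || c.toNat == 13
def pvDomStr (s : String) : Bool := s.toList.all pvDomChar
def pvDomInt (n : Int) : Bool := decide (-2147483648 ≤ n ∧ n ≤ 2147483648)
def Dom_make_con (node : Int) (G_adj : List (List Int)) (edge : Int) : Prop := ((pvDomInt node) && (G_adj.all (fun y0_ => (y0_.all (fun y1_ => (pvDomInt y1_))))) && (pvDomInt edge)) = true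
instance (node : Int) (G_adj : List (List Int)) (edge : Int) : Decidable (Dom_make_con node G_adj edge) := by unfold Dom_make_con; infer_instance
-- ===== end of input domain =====

-- B replaces A's recursive DFS by an iterative pointer-queue traversal (no recursion); the buggy
-- adjacency build, edge count and redundancy formula are kept unchanged (same return value).

-- ===== PORT A =====

-- A's adjacency build ('for i in range(edge): ...' with the original first-sighting bug).
-- The '.getD []' / '.getD 0' defaults are reached only where Python raises IndexError (outside Pre_).
def pvBuildA (G_adj : List (List Int)) (edge : Int) : PySem.Dict Int (List Int) × Int :=
  (PySem.List.pyRange 0 edge 1).foldl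
    (fun (st : PySem.Dict Int (List Int) × Int) i =>
      let row := (PySem.List.pyGet? G_adj i).getD []
      let u := (PySem.List.pyGet? row 0).getD 0
      let w := (PySem.List.pyGet? row 1).getD 0
      let adj1 := if st.1.contains u then st.1.insert u (st.1.getD u [] ++ [w]) else st.1.insert u []
      let adj2 := if adj1.contains w then adj1.insert w (adj1.getD w [] ++ [u]) else adj1.insert w []
      (adj2, st.2 + 1))
    (PySem.Dict.empty, 0)

-- A's recursive 'DFS(adj, node, visited)'.  The extra Nat argument is fuel that only makes the
-- Python recursion structural; every call site passes visited.length + 1, which is always enough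
-- (each recursive call happens on an unvisited node and immediately marks it).
def pvDfsA (adj : PySem.Dict Int (List Int)) : Nat → Int → List Bool → List Bool
  | 0, _, visited => visited
  | fuel + 1, node, visited =>
    match PySem.List.pyGet? visited node with
    | none => visited          -- Python raises IndexError here (outside Pre_)
    | some true => visited
    | some false =>
      -- visited[node] = True, then 'if node in adj: for x in adj[node]: if not visited[x]: DFS(...)'
      (adj.getD node []).foldl
        (fun vis x =>
          match PySem.List.pyGet? vis x with
          | some false => pvDfsA adj fuel x vis
          | _ => vis)
        (PySem.List.pySetD visited node true)

def make_con (node : Int) (G_adj : List (List Int)) (edge : Int) : Int :=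
  let st := pvBuildA G_adj edge
  let scan := (PySem.List.pyRange 0 node 1).foldl
    (fun (st2 : List Bool × Int) i =>
      match PySem.List.pyGet? st2.1 i with
      | some false => (pvDfsA st.1 (st2.1.length + 1) i st2.1, st2.2 + 1)
      | _ => st2)
    (List.replicate node.toNat false, 0)
  if st.2 < node - 1 then -1
  else
    let redundant := st.2 - ((node - 1) - (scan.2 - 1))
    if redundant ≥ scan.2 - 1 then scan.2 - 1 else -1

-- ===== PORT B =====

-- two lemmas the port needs for termination: marking a node that reads False strictly
-- lowers the number of False entries
lemma pvCountSetLt : ∀ (v : List Bool) (k : Nat), v[k]? = some false →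
    (v.set k true).count false < v.count false := by
  intro v
  induction v with
  | nil => intro k h; simp at h
  | cons a t ih =>
    intro k h
    cases k with
    | zero =>
      simp at h
      subst h
      simp
    | succ k =>
      simp at h
      have := ih k h
      simp [List.count_cons]
      omega

lemma pvMarkCount (v : List Bool) (u : Int) (h : PySem.List.pyGet? v u = some false) :
    (PySem.List.pySetD v u true).count false < v.count false := by
  rcases hk : PySem.List.pyIdx? v.length u with _ | k
  · simp [PySem.List.pyGet?, hk] at h
  · have hget : v[k]? = some false := by simpa [PySem.List.pyGet?, hk] using h
    have heq : PySem.List.pySetD v u true = v.set k true := by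
      simp [PySem.List.pySetD, PySem.List.pySet?, hk]
    rw [heq]
    exact pvCountSetLt v k hget

-- B's adjacency build (identical statements; Source B merely names the two endpoints)
def pvBuildB (G_adj : List (List Int)) (edge : Int) : PySem.Dict Int (List Int) × Int :=
  (PySem.List.pyRange 0 edge 1).foldl
    (fun (st : PySem.Dict Int (List Int) × Int) i =>
      let row := (PySem.List.pyGet? G_adj i).getD []
      let u := (PySem.List.pyGet? row 0).getD 0
      let w := (PySem.List.pyGet? row 1).getD 0
      let adj1 := if st.1.contains u then st.1.insert u (st.1.getD u [] ++ [w]) else st.1.insert u []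
      let adj2 := if adj1.contains w then adj1.insert w (adj1.getD w [] ++ [u]) else adj1.insert w []
      (adj2, st.2 + 1))
    (PySem.Dict.empty, 0)

-- B's iterative traversal: Python's growing list 'queue' with a moving read pointer 'head' is
-- ported as recursion on the unread suffix of the queue ('queue.extend(...)' is the '++'); exact.
def pvBfsB (adj : PySem.Dict Int (List Int)) (q : List Int) (visited : List Bool) : List Bool :=
  match q with
  | [] => visited
  | u :: rest =>
    match h : PySem.List.pyGet? visited u with
    | none => visited          -- Python raises IndexError here (outside Pre_)
    | some true => pvBfsB adj rest visited
    | some false => pvBfsB adj (rest ++ adj.getD u []) (PySem.List.pySetD visited u true)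
termination_by (visited.count false, q.length)
decreasing_by
  · exact Prod.Lex.right _ (Nat.lt_succ_self _)
  · exact Prod.Lex.left _ _ (pvMarkCount visited u h)

def make_con_alt (node : Int) (G_adj : List (List Int)) (edge : Int) : Int :=
  let st := pvBuildB G_adj edge
  let scan := (PySem.List.pyRange 0 node 1).foldl
    (fun (st2 : List Bool × Int) i =>
      match PySem.List.pyGet? st2.1 i with
      | some false => (pvBfsB st.1 [i] st2.1, st2.2 + 1)
      | _ => st2)
    (List.replicate node.toNat false, 0)
  if st.2 < node - 1 then -1
  else
    let redundant := st.2 - ((node - 1) - (scan.2 - 1))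
    if redundant ≥ scan.2 - 1 then scan.2 - 1 else -1

-- ===== PRECONDITION & SPEC =====
-- Pre_ = the natural domain: every consumed edge row exists, has both endpoints, and the
-- endpoints are node labels in [0, node).  Besides the inputs where A raises (edge beyond
-- len(G_adj), a too-short row, a label outside [-node, node)), this also excludes labels in
-- [-node, 0), where A returns a value only through Python's negative-index wraparound: there a
-- label and its alias mark the same visited slot, the component count depends on the accidental
-- traversal order, and A's and B's (equally defensible) answers can differ.
def Pre_make_con (node : Int) (G_adj : List (List Int)) (edge : Int) : Prop :=
  edge.toNat ≤ G_adj.length ∧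
  ∀ i : Nat, i < edge.toNat →
    2 ≤ (G_adj.getD i []).length ∧
    0 ≤ (G_adj.getD i []).getD 0 0 ∧ (G_adj.getD i []).getD 0 0 < node ∧
    0 ≤ (G_adj.getD i []).getD 1 0 ∧ (G_adj.getD i []).getD 1 0 < node

instance (node : Int) (G_adj : List (List Int)) (edge : Int) : Decidable (Pre_make_con node G_adj edge) := by
  unfold Pre_make_con; infer_instance

def pvWitness_make_con : Int × List (List Int) × Int := (3, [[0, 1], [1, 2]], 2)

def Spec_make_con (node : Int) (G_adj : List (List Int)) (edge : Int) (out : Int) : Prop := out = make_con_alt node G_adj edge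
instance (node : Int) (G_adj : List (List Int)) (edge : Int) (out : Int) : Decidable (Spec_make_con node G_adj edge out) := by unfold Spec_make_con; infer_instance

-- ===== CLAIM (what is proved, stated in full; the proofs are below) =====
def Claim_equal_make_con : Prop := ∀ (node : Int) (G_adj : List (List Int)) (edge : Int), Dom_make_con node G_adj edge → Pre_make_con node G_adj edge → Spec_make_con node G_adj edge (make_con node G_adj edge)

-- ===== LEMMAS AND PROOFS =====

-- all labels stored as neighbour values in the adjacency dict lie in [0, n)
def pvAdjOK (adj : PySem.Dict Int (List Int)) (n : Nat) : Prop :=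
  ∀ a x, x ∈ adj.getD a [] → 0 ≤ x ∧ x < (n : Int)

-- reachability from u along stored neighbour lists, through nodes unvisited in v
inductive pvReach (adj : PySem.Dict Int (List Int)) (v : List Bool) (u : Int) : Int → Prop
  | refl : PySem.List.pyGet? v u = some false → pvReach adj v u u
  | tail {a b : Int} : pvReach adj v u a → b ∈ adj.getD a [] →
      PySem.List.pyGet? v b = some false → pvReach adj v u b

lemma pvReach_root {adj v u b} (h : pvReach adj v u b) : PySem.List.pyGet? v u = some false := by
  induction h with
  | refl h => exact h
  | tail _ _ _ ih => exact ih

lemma pvReach_tgt {adj v u b} (h : pvReach adj v u b) : PySem.List.pyGet? v b = some false := by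
  induction h with
  | refl h => exact h
  | tail _ _ hb _ => exact hb

lemma pvReach_trans {adj v u a b} (h1 : pvReach adj v u a) (h2 : pvReach adj v a b) :
    pvReach adj v u b := by
  induction h2 with
  | refl _ => exact h1
  | tail _ he hb ih => exact .tail ih he hb

lemma pvReach_nonneg {adj v n u b} (hadj : pvAdjOK adj n) (hu : 0 ≤ u)
    (h : pvReach adj v u b) : 0 ≤ b := by
  induction h with
  | refl _ => exact hu
  | tail _ he _ _ => exact (hadj _ _ he).1

lemma pvGet_none_congr {v' v : List Bool} (hlen : v'.length = v.length) (c : Int) :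
    (PySem.List.pyGet? v' c = none ↔ PySem.List.pyGet? v c = none) := by
  rw [PySem.List.pyGet?_eq_none_iff, PySem.List.pyGet?_eq_none_iff, hlen]

lemma pvGet_false_of_false {acc acc' : List Bool} (hlen : acc'.length = acc.length)
    (himp : ∀ c : Int, 0 ≤ c → PySem.List.pyGet? acc c = some true → PySem.List.pyGet? acc' c = some true)
    {c : Int} (hc : 0 ≤ c) (h : PySem.List.pyGet? acc' c = some false) :
    PySem.List.pyGet? acc c = some false := by
  rcases hcc : PySem.List.pyGet? acc c with _ | b0
  · exact absurd (((pvGet_none_congr hlen c).2 hcc).symm.trans h) (by simp)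
  · cases b0
    · rfl
    · rw [himp c hc hcc] at h; simp at h

lemma pvReach_mono {adj : PySem.Dict Int (List Int)} {acc acc' : List Bool} {n : Nat}
    (hlen : acc'.length = acc.length)
    (himp : ∀ c : Int, 0 ≤ c → PySem.List.pyGet? acc c = some true → PySem.List.pyGet? acc' c = some true)
    (hadj : pvAdjOK adj n) {x b : Int} (hx : 0 ≤ x)
    (h : pvReach adj acc' x b) : pvReach adj acc x b := by
  induction h with
  | refl h0 => exact .refl (pvGet_false_of_false hlen himp hx h0)
  | tail _ he hb ih => exact .tail ih he (pvGet_false_of_false hlen himp (hadj _ _ he).1 hb)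

lemma pvReach_split {adj : PySem.Dict Int (List Int)} {acc acc' : List Bool} {n : Nat}
    (hlen : acc'.length = acc.length)
    (hadj : pvAdjOK adj n) {y b : Int} (hy : 0 ≤ y)
    (h : pvReach adj acc y b) :
    pvReach adj acc' y b ∨
      ∃ a0, 0 ≤ a0 ∧ PySem.List.pyGet? acc' a0 = some true ∧ pvReach adj acc a0 b := by
  induction h with
  | refl h0 =>
    rcases hc : PySem.List.pyGet? acc' y with _ | b0
    · exact absurd (((pvGet_none_congr hlen y).1 hc).symm.trans h0) (by simp)
    · cases b0
      · exact Or.inl (.refl hc)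
      · exact Or.inr ⟨y, hy, hc, .refl h0⟩
  | @tail a b ha he hb ih =>
    have hbge := (hadj _ _ he).1
    rcases hc : PySem.List.pyGet? acc' b with _ | b0
    · exact absurd (((pvGet_none_congr hlen b).1 hc).symm.trans hb) (by simp)
    · cases b0
      · rcases ih with h' | ⟨a0, h1, h2, h3⟩
        · exact Or.inl (.tail h' he hc)
        · exact Or.inr ⟨a0, h1, h2, .tail h3 he hb⟩
      · exact Or.inr ⟨b, hbge, hc, .refl hb⟩

-- marking lemmas: about pySetD v u true where pyGet? v u = some false and 0 ≤ u
lemma pvMark_get {v : List Bool} {u : Int} (hu : 0 ≤ u)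
    (h0 : PySem.List.pyGet? v u = some false) (c : Int) (hc : 0 ≤ c) :
    PySem.List.pyGet? (PySem.List.pySetD v u true) c =
      if c = u then some true else PySem.List.pyGet? v c := by
  have hlt : u.toNat < v.length := by
    rw [PySem.List.pyGet?_of_nonneg v hu] at h0
    exact (List.getElem?_eq_some_iff.mp h0).1
  rw [PySem.List.pySetD_of_nonneg v true hu, PySem.List.pyGet?_of_nonneg _ hc,
    List.getElem?_set]
  by_cases hcu : c = u
  · subst hcu; simp [hlt]
  · have hne : u.toNat ≠ c.toNat := by omega
    simp [hne, hcu, PySem.List.pyGet?_of_nonneg v hc]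

lemma pvMark_imp {v : List Bool} {u : Int} (hu : 0 ≤ u)
    (h0 : PySem.List.pyGet? v u = some false) :
    ∀ c : Int, 0 ≤ c → PySem.List.pyGet? v c = some true →
      PySem.List.pyGet? (PySem.List.pySetD v u true) c = some true := by
  intro c hc ht
  rw [pvMark_get hu h0 c hc]
  split <;> simp [ht]

lemma pvMark_bridge {adj : PySem.Dict Int (List Int)} {v : List Bool} {n : Nat}
    (hadj : pvAdjOK adj n) {u : Int} (hu : 0 ≤ u)
    (h0 : PySem.List.pyGet? v u = some false) {b : Int}
    (h : pvReach adj v u b) :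
    PySem.List.pyGet? (PySem.List.pySetD v u true) b = some true ∨
      ∃ c ∈ adj.getD u [], pvReach adj (PySem.List.pySetD v u true) c b := by
  induction h with
  | refl _ =>
    left; rw [pvMark_get hu h0 u hu]; simp
  | @tail a b ha he hb ih =>
    rcases hcb : PySem.List.pyGet? (PySem.List.pySetD v u true) b with _ | b0
    · exact absurd (((pvGet_none_congr (PySem.List.length_pySetD v u true) b).1 hcb).symm.trans hb) (by simp)
    · cases b0
      · rcases ih with h1 | ⟨c, hcm, hrc⟩
        · have hage := pvReach_nonneg hadj hu ha
          rw [pvMark_get hu h0 a hage] at h1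
          by_cases hau : a = u
          · rw [hau] at he
            exact Or.inr ⟨b, he, .refl hcb⟩
          · rw [if_neg hau] at h1
            exact absurd (h1.symm.trans (pvReach_tgt ha)) (by simp)
        · exact Or.inr ⟨c, hcm, .tail hrc he hcb⟩
      · exact Or.inl rfl

lemma pvMark_combine {adj : PySem.Dict Int (List Int)} {v : List Bool} {n : Nat}
    (hadj : pvAdjOK adj n) {u : Int} (hu : 0 ≤ u)
    (h0 : PySem.List.pyGet? v u = some false) (b : Int) (hb : 0 ≤ b) :
    (PySem.List.pyGet? (PySem.List.pySetD v u true) b = some true ∨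
      ∃ c ∈ adj.getD u [], pvReach adj (PySem.List.pySetD v u true) c b)
    ↔ (PySem.List.pyGet? v b = some true ∨ pvReach adj v u b) := by
  constructor
  · rintro (h1 | ⟨c, hcm, hrc⟩)
    · rw [pvMark_get hu h0 b hb] at h1
      by_cases hbu : b = u
      · subst hbu; exact Or.inr (.refl h0)
      · rw [if_neg hbu] at h1; exact Or.inl h1
    · have hc0 : 0 ≤ c := (hadj _ _ hcm).1
      have hr : pvReach adj v c b :=
        pvReach_mono (PySem.List.length_pySetD v u true) (pvMark_imp hu h0) hadj hc0 hrc
      exact Or.inr (pvReach_trans (.tail (.refl h0) hcm (pvReach_root hr)) hr)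
  · rintro (h1 | h1)
    · exact Or.inl (pvMark_imp hu h0 b hb h1)
    · exact pvMark_bridge hadj hu h0 h1

lemma pvCountLe : ∀ (v w : List Bool), w.length = v.length →
    (∀ j : Nat, v[j]? = some true → w[j]? = some true) →
    w.count false ≤ v.count false := by
  intro v
  induction v with
  | nil =>
    intro w hw _
    simp at hw
    simp [hw]
  | cons a t ih =>
    intro w hw hmono
    cases w with
    | nil => simp at hw
    | cons b tw =>
      simp at hw
      have htail : ∀ j : Nat, t[j]? = some true → tw[j]? = some true := by
        intro j hj
        have := hmono (j + 1) (by simpa using hj)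
        simpa using this
      have hmain := ih tw hw htail
      cases a
      · have e1 : List.count false (false :: t) = List.count false t + 1 := by
          simp
        have e2 : List.count false (b :: tw) ≤ List.count false tw + 1 := by
          cases b <;> simp
        omega
      · have hb : b = true := by
          have := hmono 0 (by simp)
          simpa using this
        subst hb
        have e1 : List.count false (true :: t) = List.count false t := by simp
        have e2 : List.count false (true :: tw) = List.count false tw := by simp
        omega

lemma pvAbsorb {adj : PySem.Dict Int (List Int)} {n : Nat} (hadj : pvAdjOK adj n)
    {acc acc' : List Bool} (hlen : acc'.length = acc.length) {x : Int} (_hx : 0 ≤ x)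
    (hchar : ∀ c : Int, 0 ≤ c → (PySem.List.pyGet? acc' c = some true ↔
      PySem.List.pyGet? acc c = some true ∨ pvReach adj acc x c))
    (ys : List Int) (hys : ∀ y ∈ ys, 0 ≤ y) (b : Int) (hb : 0 ≤ b) :
    (PySem.List.pyGet? acc' b = some true ∨ ∃ y ∈ ys, pvReach adj acc' y b)
    ↔ (PySem.List.pyGet? acc b = some true ∨ pvReach adj acc x b ∨ ∃ y ∈ ys, pvReach adj acc y b) := by
  have himp : ∀ c : Int, 0 ≤ c → PySem.List.pyGet? acc c = some true →
      PySem.List.pyGet? acc' c = some true := fun c hc ht => (hchar c hc).2 (Or.inl ht)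
  constructor
  · rintro (h1 | ⟨y, hym, hr⟩)
    · rcases (hchar b hb).1 h1 with h | h
      · exact Or.inl h
      · exact Or.inr (Or.inl h)
    · exact Or.inr (Or.inr ⟨y, hym, pvReach_mono hlen himp hadj (hys y hym) hr⟩)
  · rintro (h1 | h1 | ⟨y, hym, hr⟩)
    · exact Or.inl (himp b hb h1)
    · exact Or.inl ((hchar b hb).2 (Or.inr h1))
    · rcases pvReach_split hlen hadj (hys y hym) hr with h' | ⟨a0, ha0, hta0, hra0⟩
      · exact Or.inr ⟨y, hym, h'⟩
      · rcases (hchar a0 ha0).1 hta0 with h | h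
        · exact absurd (h.symm.trans (pvReach_root hra0)) (by simp)
        · exact Or.inl ((hchar b hb).2 (Or.inr (pvReach_trans h hra0)))

lemma pvBfs_char {adj : PySem.Dict Int (List Int)} {n : Nat} (hadj : pvAdjOK adj n) :
    ∀ (q : List Int) (v : List Bool), v.length = n → (∀ y ∈ q, 0 ≤ y ∧ y < (n : Int)) →
      (pvBfsB adj q v).length = v.length ∧
      ∀ z : Int, 0 ≤ z → (PySem.List.pyGet? (pvBfsB adj q v) z = some true ↔
        PySem.List.pyGet? v z = some true ∨ ∃ y ∈ q, pvReach adj v y z) := by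
  intro q v
  induction q, v using pvBfsB.induct adj with
  | case1 v => simp [pvBfsB]
  | case2 v u rest h =>
    intro hv hq
    exfalso
    rw [PySem.List.pyGet?_eq_none_iff] at h
    have := hq u (by simp)
    rw [hv] at h
    exact h ⟨by omega, this.2⟩
  | case3 v u rest h ih =>
    intro hv hq
    obtain ⟨ih1, ih2⟩ := ih hv (fun y hy => hq y (by simp [hy]))
    have hred : pvBfsB adj (u :: rest) v = pvBfsB adj rest v := by
      conv_lhs => rw [pvBfsB]
      split <;> simp_all
    rw [hred]
    refine ⟨ih1, fun z hz => ?_⟩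
    rw [ih2 z hz]
    constructor
    · rintro (h1 | ⟨y, hym, hr⟩)
      · exact Or.inl h1
      · exact Or.inr ⟨y, by simp [hym], hr⟩
    · rintro (h1 | ⟨y, hym, hr⟩)
      · exact Or.inl h1
      · rcases List.mem_cons.1 hym with rfl | hy
        · exact absurd ((pvReach_root hr).symm.trans h) (by simp)
        · exact Or.inr ⟨y, hy, hr⟩
  | case4 v u rest h ih =>
    intro hv hq
    have hu : 0 ≤ u := (hq u (by simp)).1
    have hlen1 : (PySem.List.pySetD v u true).length = v.length := PySem.List.length_pySetD v u true
    have hq' : ∀ y ∈ rest ++ adj.getD u [], 0 ≤ y ∧ y < (n : Int) := by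
      intro y hy
      rcases List.mem_append.1 hy with hy | hy
      · exact hq y (by simp [hy])
      · exact hadj _ _ hy
    obtain ⟨ih1, ih2⟩ := ih (hlen1.trans hv) hq'
    have hred : pvBfsB adj (u :: rest) v =
        pvBfsB adj (rest ++ adj.getD u []) (PySem.List.pySetD v u true) := by
      conv_lhs => rw [pvBfsB]
      split <;> simp_all
    rw [hred]
    refine ⟨ih1.trans hlen1, fun z hz => ?_⟩
    rw [ih2 z hz]
    have himp := pvMark_imp hu h
    constructor
    · rintro (h1 | ⟨y, hym, hr⟩)
      · rw [pvMark_get hu h z hz] at h1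
        by_cases hzu : z = u
        · exact Or.inr ⟨u, by simp, by rw [hzu]; exact .refl h⟩
        · rw [if_neg hzu] at h1; exact Or.inl h1
      · rcases List.mem_append.1 hym with hy | hy
        · exact Or.inr ⟨y, by simp [hy], pvReach_mono hlen1 himp hadj (hq' y hym).1 hr⟩
        · have hrv : pvReach adj v y z := pvReach_mono hlen1 himp hadj (hadj _ _ hy).1 hr
          exact Or.inr ⟨u, by simp, pvReach_trans (.tail (.refl h) hy (pvReach_root hrv)) hrv⟩
    · rintro (h1 | ⟨y, hym, hr⟩)
      · exact Or.inl (himp z hz h1)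
      · rcases List.mem_cons.1 hym with rfl | hy
        · rcases pvMark_bridge hadj hu h hr with h1 | ⟨c, hcm, hrc⟩
          · exact Or.inl h1
          · exact Or.inr ⟨c, List.mem_append.2 (Or.inr hcm), hrc⟩
        · rcases pvReach_split hlen1 hadj (hq y (by simp [hy])).1 hr with h' | ⟨a0, ha0, hta0, hra0⟩
          · exact Or.inr ⟨y, List.mem_append.2 (Or.inl hy), h'⟩
          · rw [pvMark_get hu h a0 ha0] at hta0
            by_cases hau : a0 = u
            · rw [hau] at hra0
              rcases pvMark_bridge hadj hu h hra0 with h1 | ⟨c, hcm, hrc⟩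
              · exact Or.inl h1
              · exact Or.inr ⟨c, List.mem_append.2 (Or.inr hcm), hrc⟩
            · rw [if_neg hau] at hta0
              exact absurd (hta0.symm.trans (pvReach_root hra0)) (by simp)

lemma pvDfs_char {adj : PySem.Dict Int (List Int)} {n : Nat} (hadj : pvAdjOK adj n) :
    ∀ (fuel : Nat) (u : Int) (v : List Bool), v.length = n → v.count false < fuel → 0 ≤ u →
      (pvDfsA adj fuel u v).length = v.length ∧
      ∀ z : Int, 0 ≤ z → (PySem.List.pyGet? (pvDfsA adj fuel u v) z = some true ↔
        PySem.List.pyGet? v z = some true ∨ pvReach adj v u z) := by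
  intro fuel
  induction fuel with
  | zero => intro u v hv hcount hu; omega
  | succ fuel ih =>
    intro u v hv hcount hu
    rcases hg : PySem.List.pyGet? v u with _ | b0
    · have hred : pvDfsA adj (fuel + 1) u v = v := by
        simp only [pvDfsA]; rw [hg]
      rw [hred]
      refine ⟨rfl, fun z hz => ?_⟩
      constructor
      · exact Or.inl
      · rintro (h1 | h1)
        · exact h1
        · have h2 := pvReach_root h1
          rw [hg] at h2
          simp at h2
    · cases b0
      · -- visited[u] reads False: mark u, then fold over the neighbour list
        have hred : pvDfsA adj (fuel + 1) u v =
            (adj.getD u []).foldl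
              (fun vis x =>
                match PySem.List.pyGet? vis x with
                | some false => pvDfsA adj fuel x vis
                | _ => vis)
              (PySem.List.pySetD v u true) := by
          simp only [pvDfsA]; rw [hg]
        have hlen1 : (PySem.List.pySetD v u true).length = v.length :=
          PySem.List.length_pySetD v u true
        have hm := pvMarkCount v u hg
        have hc1 : (PySem.List.pySetD v u true).count false < fuel := by omega
        have hfold : ∀ (ys : List Int) (acc : List Bool), acc.length = n →
            acc.count false ≤ (PySem.List.pySetD v u true).count false →
            (∀ y ∈ ys, 0 ≤ y) →
            (ys.foldl (fun vis x =>
                match PySem.List.pyGet? vis x with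
                | some false => pvDfsA adj fuel x vis
                | _ => vis) acc).length = acc.length ∧
            ∀ z : Int, 0 ≤ z → (PySem.List.pyGet? (ys.foldl (fun vis x =>
                match PySem.List.pyGet? vis x with
                | some false => pvDfsA adj fuel x vis
                | _ => vis) acc) z = some true ↔
              PySem.List.pyGet? acc z = some true ∨ ∃ y ∈ ys, pvReach adj acc y z) := by
          intro ys
          induction ys with
          | nil => intro acc h1 h2 h3; simp
          | cons y ys ihy =>
            intro acc hacc hcnt hys
            have hy0 : 0 ≤ y := hys y (by simp)
            rw [List.foldl_cons]
            rcases hgy : PySem.List.pyGet? acc y with _ | b1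
            · obtain ⟨j1, j2⟩ := ihy acc hacc hcnt (fun w hw => hys w (by simp [hw]))
              refine ⟨j1, fun z hz => ?_⟩
              refine Iff.trans (j2 z hz) ?_
              constructor
              · rintro (h1 | ⟨y', hy', hr⟩)
                · exact Or.inl h1
                · exact Or.inr ⟨y', by simp [hy'], hr⟩
              · rintro (h1 | ⟨y', hy', hr⟩)
                · exact Or.inl h1
                · rcases List.mem_cons.1 hy' with rfl | hw
                  · have h2 := pvReach_root hr
                    rw [hgy] at h2
                    simp at h2
                  · exact Or.inr ⟨y', hw, hr⟩
            · cases b1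
              · obtain ⟨k1, k2⟩ := ih y acc hacc (by omega) hy0
                have himp2 : ∀ j : Nat, acc[j]? = some true →
                    (pvDfsA adj fuel y acc)[j]? = some true := by
                  intro j hj
                  have hk := (k2 (j : Int) (Int.natCast_nonneg j)).2
                    (Or.inl (by rw [PySem.List.pyGet?_natCast]; exact hj))
                  rw [PySem.List.pyGet?_natCast] at hk
                  exact hk
                have hcnt' : (pvDfsA adj fuel y acc).count false ≤ acc.count false :=
                  pvCountLe acc _ k1 himp2
                obtain ⟨j1, j2⟩ := ihy (pvDfsA adj fuel y acc) (k1.trans hacc)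
                  (le_trans hcnt' hcnt) (fun w hw => hys w (by simp [hw]))
                refine ⟨j1.trans k1, fun z hz => ?_⟩
                refine Iff.trans (j2 z hz)
                  (Iff.trans (pvAbsorb hadj k1 hy0 k2 ys (fun w hw => hys w (by simp [hw])) z hz) ?_)
                constructor
                · rintro (h1 | h1 | ⟨y', hy', hr⟩)
                  · exact Or.inl h1
                  · exact Or.inr ⟨y, by simp, h1⟩
                  · exact Or.inr ⟨y', by simp [hy'], hr⟩
                · rintro (h1 | ⟨y', hy', hr⟩)
                  · exact Or.inl h1
                  · rcases List.mem_cons.1 hy' with rfl | hw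
                    · exact Or.inr (Or.inl hr)
                    · exact Or.inr (Or.inr ⟨y', hw, hr⟩)
              · obtain ⟨j1, j2⟩ := ihy acc hacc hcnt (fun w hw => hys w (by simp [hw]))
                refine ⟨j1, fun z hz => ?_⟩
                refine Iff.trans (j2 z hz) ?_
                constructor
                · rintro (h1 | ⟨y', hy', hr⟩)
                  · exact Or.inl h1
                  · exact Or.inr ⟨y', by simp [hy'], hr⟩
                · rintro (h1 | ⟨y', hy', hr⟩)
                  · exact Or.inl h1
                  · rcases List.mem_cons.1 hy' with rfl | hw
                    · have h2 := pvReach_root hr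
                      rw [hgy] at h2
                      simp at h2
                    · exact Or.inr ⟨y', hw, hr⟩
        obtain ⟨f1, f2⟩ := hfold (adj.getD u []) (PySem.List.pySetD v u true)
          (hlen1.trans hv) le_rfl (fun y hy => (hadj _ _ hy).1)
        rw [hred]
        refine ⟨f1.trans hlen1, fun z hz => ?_⟩
        rw [f2 z hz]
        exact pvMark_combine hadj hu hg z hz
      · have hred : pvDfsA adj (fuel + 1) u v = v := by
          simp only [pvDfsA]; rw [hg]
        rw [hred]
        refine ⟨rfl, fun z hz => ?_⟩
        constructor
        · exact Or.inl
        · rintro (h1 | h1)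
          · exact h1
          · have h2 := pvReach_root h1
            rw [hg] at h2
            simp at h2

lemma pvDfs_eq_bfs {adj : PySem.Dict Int (List Int)} {n : Nat} (hadj : pvAdjOK adj n)
    (v : List Bool) (hv : v.length = n) {i : Int} (hi0 : 0 ≤ i) (hilt : i < (n : Int)) :
    pvDfsA adj (v.length + 1) i v = pvBfsB adj [i] v := by
  have hcnt : v.count false < v.length + 1 := Nat.lt_succ_of_le List.count_le_length
  obtain ⟨a1, a2⟩ := pvDfs_char hadj (v.length + 1) i v hv hcnt hi0
  obtain ⟨b1, b2⟩ := pvBfs_char hadj [i] v hv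
    (by intro y hy; simp at hy; subst hy; exact ⟨hi0, hilt⟩)
  apply List.ext_getElem?
  intro j
  by_cases hj : j < v.length
  · rcases h1 : (pvDfsA adj (v.length + 1) i v)[j]? with _ | bA
    · have h3 := List.getElem?_eq_none_iff.mp h1
      rw [a1] at h3
      omega
    rcases h2 : (pvBfsB adj [i] v)[j]? with _ | bB
    · have h3 := List.getElem?_eq_none_iff.mp h2
      rw [b1] at h3
      omega
    have e1 := a2 (j : Int) (Int.natCast_nonneg j)
    have e2 := b2 (j : Int) (Int.natCast_nonneg j)
    rw [PySem.List.pyGet?_natCast, h1] at e1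
    rw [PySem.List.pyGet?_natCast, h2] at e2
    simp only [List.mem_singleton, exists_eq_left, Option.some_inj] at e1 e2
    have hiff : (bA = true) ↔ (bB = true) := e1.trans e2.symm
    cases bA <;> cases bB <;> simp_all
  · have hA2 : (pvDfsA adj (v.length + 1) i v).length ≤ j := by rw [a1]; omega
    have hB2 : (pvBfsB adj [i] v).length ≤ j := by rw [b1]; omega
    rw [List.getElem?_eq_none hA2, List.getElem?_eq_none hB2]

lemma pvFoldlCongrInv {α σ : Type} (Inv : σ → Prop) (f g : σ → α → σ) :
    ∀ (l : List α) (s : σ), Inv s → (∀ s' a, Inv s' → a ∈ l → f s' a = g s' a ∧ Inv (f s' a)) →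
      l.foldl f s = l.foldl g s := by
  intro l
  induction l with
  | nil => intro s _ _; rfl
  | cons a l ihl =>
    intro s hs hstep
    obtain ⟨he, hinv⟩ := hstep s a hs (by simp)
    rw [List.foldl_cons, List.foldl_cons, ← he]
    exact ihl (f s a) hinv (fun s' b hs' hb => hstep s' b hs' (by simp [hb]))

lemma pvOuter {adj : PySem.Dict Int (List Int)} {n : Nat} (hadj : pvAdjOK adj n)
    (l : List Int) (v : List Bool) (c : Int) (hv : v.length = n)
    (hl : ∀ i ∈ l, 0 ≤ i ∧ i < (n : Int)) :
    l.foldl (fun (st2 : List Bool × Int) i =>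
      match PySem.List.pyGet? st2.1 i with
      | some false => (pvDfsA adj (st2.1.length + 1) i st2.1, st2.2 + 1)
      | _ => st2) (v, c)
    = l.foldl (fun (st2 : List Bool × Int) i =>
      match PySem.List.pyGet? st2.1 i with
      | some false => (pvBfsB adj [i] st2.1, st2.2 + 1)
      | _ => st2) (v, c) := by
  apply pvFoldlCongrInv (fun st2 : List Bool × Int => st2.1.length = n)
  · exact hv
  · intro s a hs ha
    obtain ⟨w, d⟩ := s
    have hw : w.length = n := hs
    have hi := hl a ha
    rcases hg : PySem.List.pyGet? w a with _ | b0
    · exact ⟨rfl, hw⟩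
    · cases b0
      · have hbfs : (pvBfsB adj [a] w).length = n :=
          ((pvBfs_char hadj [a] w hw
            (by intro y hy; simp at hy; subst hy; exact hi)).1).trans hw
        have he : pvDfsA adj (w.length + 1) a w = pvBfsB adj [a] w :=
          pvDfs_eq_bfs hadj w hw hi.1 hi.2
        constructor
        · show (pvDfsA adj (w.length + 1) a w, d + 1) = (pvBfsB adj [a] w, d + 1)
          rw [he]
        · show (pvDfsA adj (w.length + 1) a w).length = n
          rw [he]
          exact hbfs
      · exact ⟨rfl, hw⟩

theorem pvBuild_eq (G_adj : List (List Int)) (edge : Int) :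
    pvBuildB G_adj edge = pvBuildA G_adj edge := rfl

lemma pvInsOK (P : Int → Prop) (d : PySem.Dict Int (List Int)) (u w : Int)
    (hd : ∀ a x, x ∈ d.getD a [] → P x) (hw : P w) :
    ∀ a x, x ∈ (if d.contains u then d.insert u (d.getD u [] ++ [w]) else d.insert u []).getD a [] → P x := by
  intro a x hx
  split at hx
  · rw [PySem.Dict.getD_insert] at hx
    split at hx
    · rcases List.mem_append.1 hx with hx | hx
      · exact hd _ _ hx
      · simp at hx; subst hx; exact hw
    · exact hd _ _ hx
  · rw [PySem.Dict.getD_insert] at hx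
    split at hx
    · simp at hx
    · exact hd _ _ hx

lemma pvBuildAux (G_adj : List (List Int)) (P : Int → Prop) :
    ∀ (l : List Int) (st : PySem.Dict Int (List Int) × Int),
      (∀ a x, x ∈ st.1.getD a [] → P x) →
      (∀ i ∈ l, P ((PySem.List.pyGet? ((PySem.List.pyGet? G_adj i).getD []) 0).getD 0) ∧
                P ((PySem.List.pyGet? ((PySem.List.pyGet? G_adj i).getD []) 1).getD 0)) →
      ∀ a x, x ∈ ((l.foldl
        (fun (st : PySem.Dict Int (List Int) × Int) i =>
          let row := (PySem.List.pyGet? G_adj i).getD []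
          let u := (PySem.List.pyGet? row 0).getD 0
          let w := (PySem.List.pyGet? row 1).getD 0
          let adj1 := if st.1.contains u then st.1.insert u (st.1.getD u [] ++ [w]) else st.1.insert u []
          let adj2 := if adj1.contains w then adj1.insert w (adj1.getD w [] ++ [u]) else adj1.insert w []
          (adj2, st.2 + 1)) st).1).getD a [] → P x := by
  intro l
  induction l with
  | nil => intro st hst _; exact hst
  | cons i l ihl =>
    intro st hst hl
    rw [List.foldl_cons]
    apply ihl
    · have h1 := pvInsOK P st.1
        ((PySem.List.pyGet? ((PySem.List.pyGet? G_adj i).getD []) 0).getD 0)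
        ((PySem.List.pyGet? ((PySem.List.pyGet? G_adj i).getD []) 1).getD 0)
        hst (hl i (by simp)).2
      have h2 := pvInsOK P _
        ((PySem.List.pyGet? ((PySem.List.pyGet? G_adj i).getD []) 1).getD 0)
        ((PySem.List.pyGet? ((PySem.List.pyGet? G_adj i).getD []) 0).getD 0)
        h1 (hl i (by simp)).1
      exact h2
    · intro j hj
      exact hl j (by simp [hj])

lemma pvBuildOK (node : Int) (G_adj : List (List Int)) (edge : Int)
    (hpre : Pre_make_con node G_adj edge) :
    pvAdjOK (pvBuildA G_adj edge).1 node.toNat := by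
  intro a x hx
  unfold pvBuildA at hx
  refine pvBuildAux G_adj (fun x => 0 ≤ x ∧ x < ((node.toNat : Nat) : Int))
    (PySem.List.pyRange 0 edge 1) (PySem.Dict.empty, 0) ?_ ?_ a x hx
  · intro a' x' hx'
    rw [PySem.Dict.getD_empty] at hx'
    simp at hx'
  · intro i hi
    rw [PySem.List.mem_pyRange_one] at hi
    have h0 : 0 ≤ i := hi.1
    have hlt : i.toNat < edge.toNat := by omega
    obtain ⟨h2, ha0, han, hb0, hbn⟩ := hpre.2 i.toNat hlt
    have hrowe : (PySem.List.pyGet? G_adj i).getD [] = G_adj.getD i.toNat [] := by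
      rw [PySem.List.pyGet?_of_nonneg G_adj h0]
      exact (List.getD_eq_getElem?_getD).symm
    have h0e : (PySem.List.pyGet? ((PySem.List.pyGet? G_adj i).getD []) 0).getD 0
        = (G_adj.getD i.toNat []).getD 0 0 := by
      rw [hrowe, PySem.List.pyGet?_zero]
      exact (List.getD_eq_getElem?_getD).symm
    have h1e : (PySem.List.pyGet? ((PySem.List.pyGet? G_adj i).getD []) 1).getD 0
        = (G_adj.getD i.toNat []).getD 1 0 := by
      rw [hrowe, PySem.List.pyGet?_of_nonneg _ (by norm_num : (0:Int) ≤ 1)]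
      exact (List.getD_eq_getElem?_getD).symm
    have hself := Int.self_le_toNat node
    rw [h0e, h1e]
    exact ⟨⟨ha0, by omega⟩, ⟨hb0, by omega⟩⟩

-- ===== VERDICT (by name: the statement is the Claim_ definition above) =====
theorem make_con_spec : Claim_equal_make_con := by
  intro node G_adj edge hdom hpre
  simp only [Spec_make_con, make_con, make_con_alt, pvBuild_eq]
  have hadj := pvBuildOK node G_adj edge hpre
  have hscan := pvOuter hadj (PySem.List.pyRange 0 node 1) (List.replicate node.toNat false) 0
    (by simp)
    (by
      intro i hi
      rw [PySem.List.mem_pyRange_one] at hi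
      have := Int.self_le_toNat node
      exact ⟨hi.1, by omega⟩)
  rw [hscan]
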